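-- pv_equiv track=rewrite | github.com/JFincher42/AOC2022 | day03/day03/day03.py | part1
-- ===== SOURCE A (Python) =====
-- import string
--
-- def part1(lines):
--     priority = 0
--     for line in lines:
--         first = line[: len(line) // 2]
--         last = line[len(line) // 2 :]
--         for ch in first:
--             if ch in last:
--                 priority += string.ascii_letters.index(ch)+1
--                 break
--
--     return priority
-- ===== SOURCE B (Python) =====
-- import string
--
-- def part1(lines):
--     total = 0
--     for line in lines:
--         mid = len(line) // 2
--         first, last = line[:mid], line[mid:]
--         common = set(first) & set(last)
--         if common:
--             ch = min(common, key=first.index)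
--             total += ord(ch) - 96 if ch.islower() else ord(ch) - 38
--     return total
-- ===== Notes on version B (the rewrite author's own statement) =====
-- stated objective: alternative
-- what changed: replaces A's short-circuit scan of the first half with a nested 'ch in last' test and an ascii_letters.index lookup by a set intersection of the two halves, a min-by-first-index selection of the earliest shared character, and an arithmetic ord-based priority
import Mathlib
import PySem

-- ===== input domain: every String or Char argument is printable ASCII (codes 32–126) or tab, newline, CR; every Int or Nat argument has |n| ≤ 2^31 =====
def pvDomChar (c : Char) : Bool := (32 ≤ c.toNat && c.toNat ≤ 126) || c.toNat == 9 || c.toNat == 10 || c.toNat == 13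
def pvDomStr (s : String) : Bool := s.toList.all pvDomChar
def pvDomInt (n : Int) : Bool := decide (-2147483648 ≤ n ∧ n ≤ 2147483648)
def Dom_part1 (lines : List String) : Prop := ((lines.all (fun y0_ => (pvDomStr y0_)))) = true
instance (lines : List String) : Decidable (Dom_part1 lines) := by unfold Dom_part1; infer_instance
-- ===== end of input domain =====

-- B replaces A's short-circuit scan + ascii_letters.index with a set intersection of the
-- two halves, a min-by-first-index selection, and an arithmetic ord-based priority (alternative, not faster).

-- ===== PORT A =====
-- string.ascii_letters
def asciiLetters : List Char := "abcdefghijklmnopqrstuvwxyzABCDEFGHIJKLMNOPQRSTUVWXYZ".toList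

-- 'for ch in first: if ch in last: priority += ascii_letters.index(ch)+1; break'
-- single-char 'ch in last' on a str is exactly char membership; ascii_letters.index raises
-- ValueError when ch is not a letter (index? = none) — those inputs are outside Pre_part1.
def scanA (last : List Char) : List Char → Int
  | [] => 0
  | c :: cs =>
      if last.contains c then ((PySem.List.index? asciiLetters c).getD 0 : Int) + 1
      else scanA last cs

def part1 (lines : List String) : Int :=
  lines.foldl (fun priority line =>
    let cs := line.toList
    let mid := PySem.Int.floordiv (PySem.Str.len line) 2
    let first := PySem.List.slice cs none (some mid)
    let last := PySem.List.slice cs (some mid) none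
    priority + scanA last first) 0

-- ===== PORT B =====
-- ord(ch)-96 if ch.islower() else ord(ch)-38
def priOf (c : Char) : Int := if c.isLower then (c.toNat : Int) - 96 else (c.toNat : Int) - 38

def part1_alt (lines : List String) : Int :=
  lines.foldl (fun total line =>
    let cs := line.toList
    let mid := PySem.Int.floordiv (PySem.Str.len line) 2
    let first := PySem.List.slice cs none (some mid)
    let last := PySem.List.slice cs (some mid) none
    let common := PySem.Set.inter (PySem.Set.ofList first) (PySem.Set.ofList last)
    -- min(common, key=first.index): the key is injective on common, so the result does
    -- not depend on Python's set iteration order; first.index(ch) always succeeds here.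
    match PySem.List.min? common (fun c => (PySem.List.index? first c).getD 0) with
    | none => total
    | some ch => total + priOf ch) 0

-- ===== PRECONDITION & SPEC =====
-- Pre_ excludes exactly the inputs on which A raises ValueError: a line whose first
-- character shared between the two halves is not an ASCII letter (ascii_letters.index fails).
def preLetters : List Char := "abcdefghijklmnopqrstuvwxyzABCDEFGHIJKLMNOPQRSTUVWXYZ".toList

def preLineOK (line : String) : Bool :=
  match (line.toList.take (line.toList.length / 2)).find?
      (fun c => (line.toList.drop (line.toList.length / 2)).contains c) with
  | none => true
  | some c => preLetters.contains c

def Pre_part1 (lines : List String) : Prop := lines.all preLineOK = true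
instance (lines : List String) : Decidable (Pre_part1 lines) := by unfold Pre_part1; infer_instance

def pvWitness_part1 : List String := ["vJrwpWtwJgWrhcsFMMfFFhFp", "abZcaXc"]

def Spec_part1 (lines : List String) (out : Int) : Prop := out = part1_alt lines
instance (lines : List String) (out : Int) : Decidable (Spec_part1 lines out) := by unfold Spec_part1; infer_instance

-- ===== CLAIM (what is proved, stated in full; the proofs are below) =====
def Claim_equal_part1 : Prop := ∀ (lines : List String), Dom_part1 lines → Pre_part1 lines → Spec_part1 lines (part1 lines)

-- ===== LEMMAS AND PROOFS =====

theorem scanA_of_none (last first : List Char) (h : ∀ x ∈ first, last.contains x = false) :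
    scanA last first = 0 := by
  induction first with
  | nil => rfl
  | cons c cs ih =>
      have hc := h c (by simp)
      simp only [scanA, hc, Bool.false_eq_true, if_false]
      exact ih (fun x hx => h x (by simp [hx]))

theorem scanA_append (last pre suf : List Char) (c0 : Char)
    (hpre : ∀ a ∈ pre, last.contains a = false) (hc0 : last.contains c0 = true) :
    scanA last (pre ++ c0 :: suf) = ((PySem.List.index? asciiLetters c0).getD 0 : Int) + 1 := by
  induction pre with
  | nil => simp only [List.nil_append, scanA, hc0, if_true]
  | cons a as ih =>
      have ha := hpre a (by simp)
      simp only [List.cons_append, scanA, ha, Bool.false_eq_true, if_false]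
      exact ih (fun x hx => hpre x (by simp [hx]))

set_option maxRecDepth 2000 in
theorem pri_all : (preLetters.all
    (fun c => ((PySem.List.index? asciiLetters c).getD 0 : Int) + 1 == priOf c)) = true := by
  decide

theorem pri_eq : ∀ c ∈ preLetters, ((PySem.List.index? asciiLetters c).getD 0 : Int) + 1 = priOf c := by
  intro c hc
  have := List.all_eq_true.mp pri_all c hc
  simpa using this

theorem contrib_eq (first last : List Char)
    (hok : ∀ c, first.find? (fun c => last.contains c) = some c → preLetters.contains c = true) :
    scanA last first =
      (match PySem.List.min? (PySem.Set.inter (PySem.Set.ofList first) (PySem.Set.ofList last))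
          (fun c => (PySem.List.index? first c).getD 0) with
        | none => 0
        | some ch => priOf ch) := by
  cases hf : first.find? (fun c => last.contains c) with
  | none =>
      have h1 : ∀ x ∈ first, last.contains x = false := by
        intro x hx
        have := List.find?_eq_none.mp hf x hx
        simpa using this
      have hcommon : PySem.Set.inter (PySem.Set.ofList first) (PySem.Set.ofList last) = [] := by
        rw [List.eq_nil_iff_forall_not_mem]
        intro y hy
        rcases (PySem.Set.mem_inter _ _ y).mp hy with ⟨hyf, hyl⟩
        have hyf' := (PySem.Set.mem_ofList _ y).mp hyf
        have hyl' := (PySem.Set.mem_ofList _ y).mp hyl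
        have hy' : y ∉ last := by simpa using h1 y hyf'
        exact hy' hyl'
      rw [hcommon]
      have hmn : PySem.List.min? ([] : List Char) (fun c => (PySem.List.index? first c).getD 0) = none :=
        (PySem.List.min?_eq_none_iff _ _).mpr rfl
      rw [hmn]
      exact scanA_of_none last first h1
  | some c0 =>
      obtain ⟨hc0last, pre, suf, hsplit, hpre⟩ := List.find?_eq_some_iff_append.mp hf
      subst hsplit
      have hpre' : ∀ a ∈ pre, last.contains a = false := by
        intro a ha; have := hpre a ha; simpa using this
      have hc0first : c0 ∈ pre ++ c0 :: suf := by simp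
      have hc0lastmem : c0 ∈ last := by simpa using hc0last
      have hc0common : c0 ∈ PySem.Set.inter (PySem.Set.ofList (pre ++ c0 :: suf)) (PySem.Set.ofList last) := by
        rw [PySem.Set.mem_inter, PySem.Set.mem_ofList, PySem.Set.mem_ofList]
        exact ⟨hc0first, hc0lastmem⟩
      have hc0notpre : c0 ∉ pre := by
        intro h
        have := hpre' c0 h
        rw [hc0last] at this
        simp at this
      have hidx0 : PySem.List.index? (pre ++ c0 :: suf) c0 = some pre.length :=
        (PySem.List.index?_eq_some_iff _ _ _).mpr ⟨pre, suf, rfl, rfl, hc0notpre⟩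
      rw [scanA_append last pre suf c0 hpre' hc0last]
      cases hmin : PySem.List.min? (PySem.Set.inter (PySem.Set.ofList (pre ++ c0 :: suf)) (PySem.Set.ofList last))
          (fun c => (PySem.List.index? (pre ++ c0 :: suf) c).getD 0) with
      | none =>
          rw [PySem.List.min?_eq_none_iff] at hmin
          rw [hmin] at hc0common
          exact absurd hc0common List.not_mem_nil
      | some m =>
          have hm_mem := PySem.List.min?_mem hmin
          rcases (PySem.Set.mem_inter _ _ m).mp hm_mem with ⟨hmf, hml⟩
          have hmfirst : m ∈ pre ++ c0 :: suf := (PySem.Set.mem_ofList _ m).mp hmf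
          have hmlast : m ∈ last := (PySem.Set.mem_ofList _ m).mp hml
          obtain ⟨k, hidxm⟩ := Option.isSome_iff_exists.mp
            ((PySem.List.index?_isSome_iff _ m).mpr hmfirst)
          obtain ⟨hk, hfk, hmink⟩ := PySem.List.getElem_of_index?_eq_some hidxm
          have hle : k ≤ pre.length := by
            have h2 := PySem.List.min?_isMin hmin c0 hc0common
            simp only [hidxm, hidx0, Option.getD_some] at h2
            exact h2
          have hge : pre.length ≤ k := by
            by_contra hnle
            -- k < pre.length: then the k-th char lies in pre, hence not in last, but it is m ∈ last
            have hlt : k < pre.length := Nat.lt_of_not_le hnle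
            have e : (pre ++ c0 :: suf)[k]'hk = pre[k]'hlt := List.getElem_append_left hlt
            have hmpre : m ∈ pre := by
              rw [← hfk, e]; exact List.getElem_mem _
            have hnl : m ∉ last := by simpa using hpre' m hmpre
            exact hnl hmlast
          have hkeq : k = pre.length := le_antisymm hle hge
          subst hkeq
          have hmc0 : m = c0 := by
            rw [← hfk]
            simp
          rw [hmc0]
          have hc0mem : c0 ∈ preLetters := by
            have := hok c0 hf
            simpa using this
          exact pri_eq c0 hc0mem

theorem step_eq (acc : Int) (line : String) (h : preLineOK line = true) :
    (acc + scanA (PySem.List.slice line.toList (some (PySem.Int.floordiv (PySem.Str.len line) 2)) none)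
        (PySem.List.slice line.toList none (some (PySem.Int.floordiv (PySem.Str.len line) 2))))
    = (match PySem.List.min?
          (PySem.Set.inter
            (PySem.Set.ofList (PySem.List.slice line.toList none (some (PySem.Int.floordiv (PySem.Str.len line) 2))))
            (PySem.Set.ofList (PySem.List.slice line.toList (some (PySem.Int.floordiv (PySem.Str.len line) 2)) none)))
          (fun c => (PySem.List.index? (PySem.List.slice line.toList none (some (PySem.Int.floordiv (PySem.Str.len line) 2))) c).getD 0) with
        | none => acc
        | some ch => acc + priOf ch) := by
  have hm : PySem.Int.floordiv (PySem.Str.len line) 2 = ((line.toList.length / 2 : Nat) : Int) := by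
    rw [PySem.Str.len_eq]
    exact_mod_cast PySem.Int.floordiv_natCast line.toList.length 2
  rw [hm, PySem.List.slice_to_natCast, PySem.List.slice_from_natCast]
  have hok : ∀ c, (line.toList.take (line.toList.length / 2)).find?
      (fun c => (line.toList.drop (line.toList.length / 2)).contains c) = some c →
      preLetters.contains c = true := by
    intro c hc
    unfold preLineOK at h
    rw [hc] at h
    exact h
  have := contrib_eq (line.toList.take (line.toList.length / 2))
      (line.toList.drop (line.toList.length / 2)) hok
  rw [this]
  cases PySem.List.min?
      (PySem.Set.inter (PySem.Set.ofList (line.toList.take (line.toList.length / 2)))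
        (PySem.Set.ofList (line.toList.drop (line.toList.length / 2))))
      (fun c => (PySem.List.index? (line.toList.take (line.toList.length / 2)) c).getD 0) with
  | none => simp
  | some ch => simp

theorem fold_aux (lines : List String) : ∀ acc : Int, (∀ l ∈ lines, preLineOK l = true) →
    lines.foldl (fun priority line =>
      let cs := line.toList
      let mid := PySem.Int.floordiv (PySem.Str.len line) 2
      let first := PySem.List.slice cs none (some mid)
      let last := PySem.List.slice cs (some mid) none
      priority + scanA last first) acc
    = lines.foldl (fun total line =>
      let cs := line.toList
      let mid := PySem.Int.floordiv (PySem.Str.len line) 2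
      let first := PySem.List.slice cs none (some mid)
      let last := PySem.List.slice cs (some mid) none
      let common := PySem.Set.inter (PySem.Set.ofList first) (PySem.Set.ofList last)
      match PySem.List.min? common (fun c => (PySem.List.index? first c).getD 0) with
      | none => total
      | some ch => total + priOf ch) acc := by
  induction lines with
  | nil => intro acc _; rfl
  | cons l ls ih =>
      intro acc h
      simp only [List.foldl_cons]
      rw [step_eq acc l (h l (by simp))]
      exact ih _ (fun x hx => h x (by simp [hx]))

-- ===== VERDICT (by name: the statement is the Claim_ definition above) =====
theorem part1_spec : Claim_equal_part1 := by
  intro lines _ hpre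
  unfold Spec_part1 part1 part1_alt
  apply fold_aux
  intro l hl
  unfold Pre_part1 at hpre
  rw [List.all_eq_true] at hpre
  exact hpre l hl
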